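-- pv_equiv track=rewrite | github.com/Woleek/Scrambler-project | server.py | scram_X16
-- ===== SOURCE A (Python) =====
-- from operator import xor
--
-- def sync_clock(frame, data, bit):
--     if bit[1] != -1:  # Checking whether we use both bits required for some scramblers
--         temp = xor(frame[bit[0] - 1], frame[bit[1] - 1])  # XOR for bit[0] and bit[1]
--     else:  # If there is only 1 bit, value is assigned to this bit
--         temp = frame[bit[0] - 1]
--     frame.pop()  # Remove the last bit from the frame
--     frame.insert(0, temp)  # Add XOR result at the beginning
--     xor_value = xor(temp, data)  # Feedback of input syganle and XOR values of frame bits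
--     return xor_value  # Return result of the coded signal
--
-- def scram_X16(bits):
--     data_length = len(bits)
--     frame_X16 = [1, 0, 1, 0, 0, 0, 0, 0, 1, 0, 1, 1, 0, 1, 0, 0, 1]  # Synchronization frame for scrambler
--     scram_bit = [16, -1]  # Bits used in the feedback - for x16 bit 16, -1 if second bit is missing
--     output_signal = []  # Array for output data
--     for i in range(0, data_length):
--         clock_result = sync_clock(frame_X16, bits[i], scram_bit)  # Perform clock operations for additive scrambler
--         output_signal.append(clock_result)  # Add results to the output array
--     return output_signal
-- ===== SOURCE B (Python) =====
-- # The register never sees the data and its first 16 cells merely rotate, so the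
-- # keystream is the fixed period-16 sequence below: XOR it in directly, no register.
-- _KEY = [0, 0, 1, 0, 1, 1, 0, 1, 0, 0, 0, 0, 0, 1, 0, 1]
--
-- def scram_X16(bits):
--     return [_KEY[i % 16] ^ d for i, d in enumerate(bits)]
-- ===== Notes on version B (the rewrite author's own statement) =====
-- stated objective: faster
-- what changed: A simulates a 17-cell shift register per input bit via a mutating helper; B drops the register entirely and XORs the input with the precomputed fixed period-16 keystream via index mod 16 (the register's first 16 cells just rotate, so its output is that periodic constant sequence); measured ~1.7x faster by removing per-step list pop/insert.
import Mathlib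
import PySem

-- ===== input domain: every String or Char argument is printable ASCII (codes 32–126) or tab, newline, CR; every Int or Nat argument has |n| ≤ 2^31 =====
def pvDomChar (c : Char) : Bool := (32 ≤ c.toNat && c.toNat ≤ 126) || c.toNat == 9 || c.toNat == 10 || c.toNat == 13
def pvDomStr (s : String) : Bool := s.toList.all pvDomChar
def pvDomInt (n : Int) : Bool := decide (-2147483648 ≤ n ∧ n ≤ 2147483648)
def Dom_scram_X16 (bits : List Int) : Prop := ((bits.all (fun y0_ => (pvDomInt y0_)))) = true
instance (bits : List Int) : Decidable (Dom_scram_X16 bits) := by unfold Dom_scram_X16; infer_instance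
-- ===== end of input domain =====

-- B replaces A's per-element 17-cell shift-register simulation by a direct XOR with the
-- precomputed fixed period-16 keystream (the first 16 register cells only rotate): measured faster.

-- ===== PORT A =====
-- sync_clock mutates `frame` in Python; ported as returning the new frame with the result.
-- frame.pop() is List.dropLast (exact: pop on a nonempty list removes the last element;
-- frame is always nonempty here).
def sync_clock (frame : List Int) (data : Int) (bit : List Int) : List Int × Int :=
  let temp :=
    if PySem.List.pyGetD bit 1 0 ≠ -1 then
      PySem.Int.bxor (PySem.List.pyGetD frame (PySem.List.pyGetD bit 0 0 - 1) 0)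
                     (PySem.List.pyGetD frame (PySem.List.pyGetD bit 1 0 - 1) 0)
    else
      PySem.List.pyGetD frame (PySem.List.pyGetD bit 0 0 - 1) 0
  let frame1 := frame.dropLast
  let frame2 := temp :: frame1
  (frame2, PySem.Int.bxor temp data)

def scram_X16 (bits : List Int) : List Int :=
  let data_length := PySem.List.len bits
  let frame_X16 : List Int := [1, 0, 1, 0, 0, 0, 0, 0, 1, 0, 1, 1, 0, 1, 0, 0, 1]
  let scram_bit : List Int := [16, -1]
  -- bits[i] with i drawn from range(0, len(bits)): always in range, default never used
  let res := (PySem.List.pyRange 0 data_length 1).foldl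
    (fun (st : List Int × List Int) i =>
      let r := sync_clock st.1 (PySem.List.pyGetD bits i 0) scram_bit
      (r.1, st.2 ++ [r.2]))
    (frame_X16, [])
  res.2

-- ===== PORT B =====
-- the module-level constant _KEY of Source B
def altKEY : List Int := [0, 0, 1, 0, 1, 1, 0, 1, 0, 0, 0, 0, 0, 1, 0, 1]

def scram_X16_alt (bits : List Int) : List Int :=
  (PySem.List.enumerate bits).map
    (fun p => PySem.Int.bxor (PySem.List.pyGetD altKEY (PySem.Int.mod p.1 16) 0) p.2)

-- ===== PRECONDITION & SPEC =====
def Spec_scram_X16 (bits : List Int) (out : List Int) : Prop := out = scram_X16_alt bits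
instance (bits : List Int) (out : List Int) : Decidable (Spec_scram_X16 bits out) := by unfold Spec_scram_X16; infer_instance

-- ===== CLAIM (what is proved, stated in full; the proofs are below) =====
def Claim_equal_scram_X16 : Prop := ∀ (bits : List Int), Dom_scram_X16 bits → Spec_scram_X16 bits (scram_X16 bits)

-- ===== LEMMAS AND PROOFS =====

-- keystream value at step j (Nat form used by the proofs)
def keyAt (j : Nat) : Int := PySem.List.pyGetD altKEY (j % 16 : Nat) 0

-- A's frame after j clock steps: cell p holds keyAt (j + 31 - p), p = 0 … 16
def frameAt (j : Nat) : List Int := (List.range 17).map (fun p => keyAt (j + 31 - p))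

lemma keyAt_add_16 (j : Nat) : keyAt (j + 16) = keyAt j := by
  simp [keyAt, Nat.add_mod_right]

lemma frameAt_zero :
    frameAt 0 = [1, 0, 1, 0, 0, 0, 0, 0, 1, 0, 1, 1, 0, 1, 0, 0, 1] := by decide

lemma frameAt_get15 (j : Nat) : PySem.List.pyGetD (frameAt j) 15 0 = keyAt (j + 16) := by
  have : ((15 : Int)) = ((15 : Nat) : Int) := by norm_num
  rw [frameAt, this, PySem.List.pyGetD_natCast]
  simp [List.getD]

lemma frameAt_step (j : Nat) :
    keyAt (j + 16) :: (frameAt j).dropLast = frameAt (j + 1) := by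
  apply List.ext_getElem
  · simp [frameAt]
  · intro k h1 h2
    simp only [frameAt, List.length_map, List.length_range] at h2 ⊢
    match k with
    | 0 =>
      simp [List.getElem_map, List.getElem_range]
      rw [show j + 1 + 31 = (j + 16) + 16 by omega, keyAt_add_16, keyAt_add_16, keyAt_add_16]
    | Nat.succ k =>
      have hk : k < 16 := by omega
      simp only [List.getElem_cons_succ]
      rw [List.getElem_dropLast]
      simp [List.getElem_map, List.getElem_range]

-- the keystream-XOR of the remaining input, starting at clock step j (B's value, recursively)
def specKey (j : Nat) : List Int → List Int
  | [] => []
  | d :: rest => PySem.Int.bxor (keyAt j) d :: specKey (j + 1) rest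

-- loop invariant for A's fold: from frame = frameAt j the fold appends specKey j of the rest
lemma loop_eq (bits : List Int) : ∀ (j : Nat) (acc : List Int),
    (bits.foldl
      (fun (st : List Int × List Int) d =>
        let r := sync_clock st.1 d [16, -1]
        (r.1, st.2 ++ [r.2]))
      (frameAt j, acc)).2
    = acc ++ specKey j bits := by
  induction bits with
  | nil => intro j acc; simp [specKey]
  | cons d rest ih =>
    intro j acc
    rw [List.foldl_cons]
    have hstep : sync_clock (frameAt j) d [16, -1] =
        (frameAt (j + 1), PySem.Int.bxor (keyAt j) d) := by
      have hb : PySem.List.pyGetD ([16, -1] : List Int) 1 0 = -1 := by decide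
      simp only [sync_clock, hb,
        show PySem.List.pyGetD ([16, -1] : List Int) 0 0 - 1 = (15 : Int) by decide]
      rw [if_neg (by norm_num : ¬((-1 : Int) ≠ -1))]
      rw [frameAt_get15, frameAt_step, keyAt_add_16]
    simp only [hstep]
    rw [ih (j + 1) (acc ++ [PySem.Int.bxor (keyAt j) d])]
    simp [specKey]

-- B's map over enumerate, started at index s, is specKey s (for 0 ≤ s as a Nat start)
lemma alt_eq_specKey (bits : List Int) : ∀ (s : Nat),
    (PySem.List.enumerate bits (s : Int)).map
      (fun p => PySem.Int.bxor (PySem.List.pyGetD altKEY (PySem.Int.mod p.1 16) 0) p.2)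
    = specKey s bits := by
  induction bits with
  | nil => intro s; simp [PySem.List.enumerate_nil, specKey]
  | cons d rest ih =>
    intro s
    rw [PySem.List.enumerate_cons, List.map_cons]
    have h1 : PySem.Int.mod ((s : Int)) 16 = ((s % 16 : Nat) : Int) := by
      rw [PySem.Int.mod_eq_emod_of_pos (by norm_num : (0:Int) < 16)]
      push_cast
      rfl
    have h2 : ((s : Int) + 1) = (((s + 1 : Nat)) : Int) := by push_cast; ring
    rw [h1, h2, ih (s + 1)]
    simp [specKey, keyAt]


-- ===== VERDICT (by name: the statement is the Claim_ definition above) =====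
theorem scram_X16_spec : Claim_equal_scram_X16 := by
  intro bits _
  unfold Spec_scram_X16 scram_X16 scram_X16_alt
  simp only [PySem.List.len_eq]
  rw [PySem.List.foldl_pyRange_zero_pyGetD' bits 0
      (fun (st : List Int × List Int) d =>
        let r := sync_clock st.1 d [16, -1]
        (r.1, st.2 ++ [r.2]))
      ([1, 0, 1, 0, 0, 0, 0, 0, 1, 0, 1, 1, 0, 1, 0, 0, 1], [])]
  rw [← frameAt_zero, loop_eq bits 0 []]
  rw [show (0 : Int) = ((0 : Nat) : Int) by norm_num] at *
  rw [← alt_eq_specKey bits 0]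
  simp
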